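-- pv_equiv track=rewrite | github.com/Pchaewon/CodingTest-practice | 프로그래머스/lv1/86051. 없는 숫자 더하기/없는 숫자 더하기.py | solution
-- ===== SOURCE A (Python) =====
-- def solution(numbers):
--     answer = set([0,1,2,3,4,5,6,7,8,9])
--     num = set(numbers)
--     diff = answer - num
--     sum_box = 0
--
--     for n in diff:
--         sum_box += n
--     return sum_box
-- ===== SOURCE B (Python) =====
-- def solution(numbers):
--     # 45 is the sum of digits 0..9; subtract the distinct in-range digits present.
--     present = set(numbers)
--     return 45 - sum(d for d in present if 0 <= d <= 9)
-- ===== Notes on version B (the rewrite author's own statement) =====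
-- stated objective: simpler
-- what changed: Replaces building and summing the set difference {0..9} - set(numbers) by the arithmetic complement: 45 minus the sum of distinct digits of numbers lying in 0..9.
import Mathlib
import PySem

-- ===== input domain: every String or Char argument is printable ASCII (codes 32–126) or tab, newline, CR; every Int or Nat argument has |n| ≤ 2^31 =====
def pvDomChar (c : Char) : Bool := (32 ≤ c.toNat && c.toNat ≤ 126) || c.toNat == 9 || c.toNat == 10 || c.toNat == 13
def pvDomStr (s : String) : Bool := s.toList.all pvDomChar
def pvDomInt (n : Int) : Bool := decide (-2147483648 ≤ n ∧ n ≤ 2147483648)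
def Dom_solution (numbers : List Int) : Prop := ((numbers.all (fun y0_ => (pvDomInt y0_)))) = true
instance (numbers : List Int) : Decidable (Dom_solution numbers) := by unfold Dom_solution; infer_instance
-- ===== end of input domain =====

-- B computes 45 minus the sum of the distinct in-range digits, instead of building the difference set.

-- ===== PORT A =====
def solution (numbers : List Int) : Int :=
  let answer : PySem.Set Int := PySem.Set.ofList [0,1,2,3,4,5,6,7,8,9]
  let num : PySem.Set Int := PySem.Set.ofList numbers
  let diff : PySem.Set Int := PySem.Set.diff answer num
  -- 'for n in diff: sum_box += n' — a fold over the set's elements; the sum is order-independent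
  diff.foldl (fun sum_box n => sum_box + n) 0

-- ===== PORT B =====
def solution_alt (numbers : List Int) : Int :=
  let present : PySem.Set Int := PySem.Set.ofList numbers
  -- sum(d for d in present if 0 <= d <= 9) — order-independent consumption of the set
  45 - (present.filter (fun d => decide (0 ≤ d ∧ d ≤ 9))).sum

-- ===== PRECONDITION & SPEC =====
def Spec_solution (numbers : List Int) (out : Int) : Prop := out = solution_alt numbers
instance (numbers : List Int) (out : Int) : Decidable (Spec_solution numbers out) := by unfold Spec_solution; infer_instance

-- ===== CLAIM (what is proved, stated in full; the proofs are below) =====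
def Claim_equal_solution : Prop := ∀ (numbers : List Int), Dom_solution numbers → Spec_solution numbers (solution numbers)

-- ===== LEMMAS AND PROOFS =====

-- foldl (+) is List.sum
lemma foldl_add_eq_sum (l : List Int) : l.foldl (fun s n => s + n) 0 = l.sum := by
  exact List.sum_eq_foldl.symm

-- a list's sum splits along any filter
lemma sum_filter_split (l : List Int) (p : Int → Bool) :
    (l.filter p).sum + (l.filter (fun x => !p x)).sum = l.sum := by
  induction l with
  | nil => simp
  | cons a t ih => by_cases h : p a <;> simp [h] <;> omega

-- membership in the digit list is the range condition
lemma mem_digits (x : Int) :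
    x ∈ ([0,1,2,3,4,5,6,7,8,9] : List Int) ↔ 0 ≤ x ∧ x ≤ 9 := by
  simp only [List.mem_cons, List.not_mem_nil, or_false]
  omega

lemma sum_present_eq (numbers : List Int) :
    (([0,1,2,3,4,5,6,7,8,9] : List Int).filter
        (fun d => (PySem.Set.ofList numbers).contains d)).sum
      = ((PySem.Set.ofList numbers).filter (fun d => decide (0 ≤ d ∧ d ≤ 9))).sum := by
  apply List.Perm.sum_eq
  apply (List.perm_ext_iff_of_nodup ?_ ?_).2
  · intro x
    simp only [List.mem_filter, mem_digits, PySem.Set.contains_iff, PySem.Set.mem_ofList,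
      decide_eq_true_eq]
    tauto
  · exact (by decide : ([0,1,2,3,4,5,6,7,8,9] : List Int).Nodup).filter _
  · exact (PySem.Set.nodup_ofList numbers).filter _

-- ===== VERDICT (by name: the statement is the Claim_ definition above) =====
theorem solution_spec : Claim_equal_solution := by
  intro numbers _
  show _ = _
  unfold solution solution_alt
  simp only [foldl_add_eq_sum]
  have hdiff : PySem.Set.diff (PySem.Set.ofList [0,1,2,3,4,5,6,7,8,9])
      (PySem.Set.ofList numbers)
      = ([0,1,2,3,4,5,6,7,8,9] : List Int).filter
          (fun d => !(PySem.Set.ofList numbers).contains d) := rfl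
  have hsplit := sum_filter_split ([0,1,2,3,4,5,6,7,8,9] : List Int)
    (fun d => (PySem.Set.ofList numbers).contains d)
  have hpresent := sum_present_eq numbers
  have h45 : ([0,1,2,3,4,5,6,7,8,9] : List Int).sum = 45 := by decide
  rw [hdiff]
  omega
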